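-- pv_equiv track=rewrite | github.com/Chri692u/AOC | AOC2023/3.py | vectorize_input
-- ===== SOURCE A (Python) =====
-- def vectorize_input(input_data):
--     vector_sto = {}
--     legal = ['$', '*', '+', '-', '#', '/',  '&', '%', '@', '=']
--
--     for id, line in enumerate(input_data):
--         working_list = []
--
--         for i, c in enumerate(line):
--             if c.isdigit() or c in legal:
--                 working_list.append((id, i, c))
--
--         vector_sto[id] = group_vector(working_list)
--
--     return vector_sto
--
-- def group_vector(vector):
--     result = []
--     temp_group = []
--
--     for i in range(len(vector)):
--         if i == 0 or vector[i][1] == vector[i - 1][1] + 1: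
--             temp_group.append(vector[i])
--         else:
--             result.append(temp_group)
--             temp_group = [vector[i]]
--
--     if temp_group:
--         result.append(temp_group)
--
--     return result
-- ===== SOURCE B (Python) =====
-- def vectorize_input(input_data):
--     legal = set('$*+-#/&%@=')
--     out = {}
--     for id, line in enumerate(input_data):
--         res = []
--         cur = []
--         last = None
--         for i, c in enumerate(line):
--             if c.isdigit() or c in legal:
--                 if cur and last is not None and i == last + 1:
--                     cur.append((id, i, c))
--                 else:
--                     if cur:
--                         res.append(cur)
--                     cur = [(id, i, c)]
--                 last = i
--         if cur:
--             res.append(cur)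
--         out[id] = res
--     return out
-- ===== Notes on version B (the rewrite author's own statement) =====
-- stated objective: simpler
-- what changed: The intermediate flat per-line list and the separate group_vector re-scan are gone: each line is grouped in one fused pass that tracks the current group and the last legal column.
import Mathlib
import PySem

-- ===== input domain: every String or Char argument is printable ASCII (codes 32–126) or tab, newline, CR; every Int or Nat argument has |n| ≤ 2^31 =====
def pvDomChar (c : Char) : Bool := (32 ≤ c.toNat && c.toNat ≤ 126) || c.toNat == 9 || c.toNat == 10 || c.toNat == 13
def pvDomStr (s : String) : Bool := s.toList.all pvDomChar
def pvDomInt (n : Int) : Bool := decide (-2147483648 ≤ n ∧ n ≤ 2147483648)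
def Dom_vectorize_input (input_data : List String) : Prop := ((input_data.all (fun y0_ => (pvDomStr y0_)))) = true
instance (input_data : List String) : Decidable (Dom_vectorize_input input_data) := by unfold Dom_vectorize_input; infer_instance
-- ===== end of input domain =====

-- B fuses A's per-line filter pass and the separate group_vector re-scan into one
-- single pass per line (same output; objective: simpler, no intermediate flat list).

-- ===== PORT A =====
def vi_legal : List Char := ['$', '*', '+', '-', '#', '/', '&', '%', '@', '=']

-- inner loop of A: 'for i, c in enumerate(line): if c.isdigit() or c in legal: working_list.append(...)'
def vi_filter (id : Int) : List (Int × Char) → List (Int × Int × String) → List (Int × Int × String)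
  | [], acc => acc
  | (i, c) :: rest, acc =>
      vi_filter id rest
        (if PySem.Chars.isdigit c || decide (c ∈ vi_legal) then acc ++ [(id, i, String.ofList [c])] else acc)

-- loop of group_vector; 'prev' carries vector[i-1] (none at i == 0), state = (result, temp_group)
def gvLoop : List (Int × Int × String) → Option (Int × Int × String) →
    List (List (Int × Int × String)) → List (Int × Int × String) → List (List (Int × Int × String))
  | [], _, result, temp => if temp = [] then result else result ++ [temp]
  | v :: vs, prev, result, temp =>
      match prev with
      | none => gvLoop vs (some v) result (temp ++ [v])
      | some p =>
          if v.2.1 = p.2.1 + 1 then gvLoop vs (some v) result (temp ++ [v])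
          else gvLoop vs (some v) (result ++ [temp]) [v]

def group_vector (vector : List (Int × Int × String)) : List (List (Int × Int × String)) :=
  gvLoop vector none [] []

def vectorize_input (input_data : List String) : List (Int × List (List (Int × Int × String))) :=
  ((PySem.List.enumerate input_data).foldl
    (fun sto p =>
      sto.insert p.1 (group_vector (vi_filter p.1 (PySem.List.enumerate p.2.toList) [])))
    PySem.Dict.empty).items

-- ===== PORT B =====
-- one fused pass over a line: res = finished groups, cur = current group, last = last legal column
def viB_line (id : Int) : List (Int × Char) → List (List (Int × Int × String)) →
    List (Int × Int × String) → Option Int → List (List (Int × Int × String))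
  | [], res, cur, _ => if cur = [] then res else res ++ [cur]
  | (i, c) :: rest, res, cur, last =>
      if PySem.Chars.isdigit c || decide (c ∈ "$*+-#/&%@=".toList) then
        match last with
        | some l =>
            if cur ≠ [] ∧ i = l + 1 then
              viB_line id rest res (cur ++ [(id, i, String.ofList [c])]) (some i)
            else
              viB_line id rest (if cur = [] then res else res ++ [cur]) [(id, i, String.ofList [c])] (some i)
        | none =>
            viB_line id rest (if cur = [] then res else res ++ [cur]) [(id, i, String.ofList [c])] (some i)
      else viB_line id rest res cur last

def vectorize_input_alt (input_data : List String) : List (Int × List (List (Int × Int × String))) :=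
  (PySem.List.enumerate input_data).map
    (fun p => (p.1, viB_line p.1 (PySem.List.enumerate p.2.toList) [] [] none))

-- ===== PRECONDITION & SPEC =====
def Spec_vectorize_input (input_data : List String) (out : List (Int × List (List (Int × Int × String)))) : Prop := out = vectorize_input_alt input_data
instance (input_data : List String) (out : List (Int × List (List (Int × Int × String)))) : Decidable (Spec_vectorize_input input_data out) := by unfold Spec_vectorize_input; infer_instance

-- ===== CLAIM (what is proved, stated in full; the proofs are below) =====
def Claim_equal_vectorize_input : Prop := ∀ (input_data : List String), Dom_vectorize_input input_data → Spec_vectorize_input input_data (vectorize_input input_data)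

-- ===== LEMMAS AND PROOFS =====

-- cons-form of A's filter loop, for reasoning
def vi_filter' (id : Int) : List (Int × Char) → List (Int × Int × String)
  | [] => []
  | (i, c) :: rest =>
      if PySem.Chars.isdigit c || decide (c ∈ vi_legal) then
        (id, i, String.ofList [c]) :: vi_filter' id rest
      else vi_filter' id rest

theorem vi_filter_eq (id : Int) (l : List (Int × Char)) (acc : List (Int × Int × String)) :
    vi_filter id l acc = acc ++ vi_filter' id l := by
  induction l generalizing acc with
  | nil => simp [vi_filter, vi_filter']
  | cons hd tl ih =>
    obtain ⟨i, c⟩ := hd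
    simp only [vi_filter, vi_filter']
    split_ifs with h <;> simp [ih]

theorem legal_toList : "$*+-#/&%@=".toList = vi_legal := by decide

theorem key_lemma (id : Int) (l : List (Int × Char))
    (res : List (List (Int × Int × String))) (cur : List (Int × Int × String))
    (prev : Option (Int × Int × String)) (last : Option Int)
    (hcol : prev.map (fun p => p.2.1) = last)
    (hcur : cur = [] ↔ prev = none) :
    gvLoop (vi_filter' id l) prev res cur = viB_line id l res cur last := by
  induction l generalizing res cur prev last with
  | nil =>
    cases prev with
    | none =>
      have hc : cur = [] := hcur.mpr rfl
      subst hc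
      simp [vi_filter', gvLoop, viB_line]
    | some p =>
      have hne : cur ≠ [] := by simp [hcur]
      simp [vi_filter', gvLoop, viB_line, hne]
  | cons hd tl ih =>
    obtain ⟨i, c⟩ := hd
    simp only [vi_filter', viB_line, legal_toList]
    by_cases h : (PySem.Chars.isdigit c || decide (c ∈ vi_legal)) = true
    · simp only [h, if_true]
      cases prev with
      | none =>
        have hc : cur = [] := hcur.mpr rfl
        subst hc
        cases last with
        | none =>
          simp only [gvLoop, List.nil_append]
          exact ih _ _ (some (id, i, String.ofList [c])) (some i) (by simp) (by simp)
        | some lc => simp at hcol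
      | some p =>
        cases last with
        | none => simp at hcol
        | some lc =>
          have hlc : p.2.1 = lc := by simpa using hcol
          have hne : cur ≠ [] := by simp [hcur]
          simp only [gvLoop]
          by_cases hadj : i = lc + 1
          · rw [if_pos (by simp [hlc, hadj]), if_pos ⟨hne, hadj⟩]
            exact ih _ _ (some (id, i, String.ofList [c])) (some i) (by simp) (by simp)
          · rw [if_neg (by simp [hlc, hadj]), if_neg (by tauto), if_neg hne]
            exact ih _ _ (some (id, i, String.ofList [c])) (some i) (by simp) (by simp)
    · simp only [h, if_false, Bool.false_eq_true]
      exact ih res cur prev last hcol hcur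

theorem line_lemma (id : Int) (l : List (Int × Char)) :
    group_vector (vi_filter id l []) = viB_line id l [] [] none := by
  rw [vi_filter_eq, List.nil_append, group_vector]
  exact key_lemma id l [] [] none none rfl (by simp)

theorem nodup_fst_enumerate {α : Type} (xs : List α) :
    ((PySem.List.enumerate xs 0).map (fun p => p.1)).Nodup := by
  rw [List.Nodup, List.pairwise_map]
  exact (PySem.List.pairwise_lt_enumerate xs 0).imp (fun h => ne_of_lt h)

-- ===== VERDICT (by name: the statement is the Claim_ definition above) =====
theorem vectorize_input_spec : Claim_equal_vectorize_input := by
  intro input_data _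
  unfold Spec_vectorize_input vectorize_input vectorize_input_alt
  rw [PySem.Dict.items_foldl_insert_fresh (PySem.List.enumerate input_data)
        (fun p => p.1) _ PySem.Dict.empty
        (fun a _ => PySem.Dict.contains_empty _)
        (nodup_fst_enumerate input_data)]
  simp only [PySem.Dict.empty, List.nil_append]
  exact List.map_congr_left (fun p _ => by rw [line_lemma])
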